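-- pv_equiv track=rewrite | github.com/hashiryo/judge | problems/gf2-64/_shared/gen_tower_custom_sparse.py | is_irreducible
-- ===== SOURCE A (Python) =====
-- def f16_mul_with_r(a: int, b: int, r_low: int) -> int:
--     p = 0
--     for i in range(16):
--         if (b >> i) & 1:
--             p ^= a << i
--     for i in range(30, 15, -1):
--         if (p >> i) & 1:
--             p ^= 1 << i
--             p ^= r_low << (i - 16)
--     return p & 0xFFFF
--
-- def is_irreducible(r_low: int) -> bool:
--     """r(s) が GF(2)[s] 上で既約か簡易チェック。
--     deg-16 では x^(2^k) - x の各 k=1..8 について gcd を取るのが正攻法だが、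
--     ここでは "x が deg 16 over GF(2)" のチェックで近似。"""
--     # x^(2^16) ≡ x (mod r) は常に成り立つ。さらに x^(2^k) ≠ x for k=1..8 (= proper divisors check)
--     # 16 の真の約数 = 1, 2, 4, 8 → x^(2^k) ≠ x をそれぞれ確認すれば既約
--     x = 2
--     for k in (1, 2, 4, 8):
--         # x^(2^k) を計算 (mod r)
--         v = x
--         for _ in range(k):
--             v = f16_mul_with_r(v, v, r_low)
--         if v == x:
--             return False
--     return True
-- ===== SOURCE B (Python) =====
-- def f16_mul_with_r(a: int, b: int, r_low: int) -> int:
--     p = 0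
--     for i in range(16):
--         if (b >> i) & 1:
--             p ^= a << i
--     for i in range(30, 15, -1):
--         if (p >> i) & 1:
--             p ^= 1 << i
--             p ^= r_low << (i - 16)
--     return p & 0xFFFF
--
-- def is_irreducible(r_low: int) -> bool:
--     # One accumulating chain of 8 squarings; compare x^(2^step) with x at the
--     # proper-divisor steps 1, 2, 4, 8 (same ascending order as the original).
--     v = 2
--     for step in range(1, 9):
--         v = f16_mul_with_r(v, v, r_low)
--         if step in (1, 2, 4, 8) and v == 2:
--             return False
--     return True
-- ===== Notes on version B (the rewrite author's own statement) =====
-- stated objective: simpler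
-- what changed: Replaced the four restart-from-x inner squaring loops (fifteen squarings total) by a single accumulating loop of eight squarings that checks the running value at the proper-divisor steps in the same ascending order.
import Mathlib
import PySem

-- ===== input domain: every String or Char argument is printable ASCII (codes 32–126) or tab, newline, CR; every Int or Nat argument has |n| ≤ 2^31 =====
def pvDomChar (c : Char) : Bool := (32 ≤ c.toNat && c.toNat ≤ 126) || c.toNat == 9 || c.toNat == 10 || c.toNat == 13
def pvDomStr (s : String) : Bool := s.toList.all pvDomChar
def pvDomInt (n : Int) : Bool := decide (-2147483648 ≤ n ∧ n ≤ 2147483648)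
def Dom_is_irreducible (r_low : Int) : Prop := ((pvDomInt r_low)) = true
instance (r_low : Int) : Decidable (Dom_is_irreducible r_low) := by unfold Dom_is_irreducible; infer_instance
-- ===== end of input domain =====

-- B replaces A's restart-and-resquare inner loops by one accumulating chain of 8 squarings,
-- checking at steps 1, 2, 4, 8 in the same ascending order (objective: simpler).

-- ===== PORT A =====
-- shared helper (both Pythons define/use the identical f16_mul_with_r)
def f16_mul_with_r (a b r_low : Int) : Int :=
  let p := (List.range 16).foldl
    (fun p i => if PySem.Int.band (b >>> i) 1 = 1 then PySem.Int.bxor p (a <<< i) else p) 0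
  let p := (PySem.List.pyRange 30 15 (-1)).foldl
    (fun p i =>
      if PySem.Int.band (p >>> i.toNat) 1 = 1 then
        PySem.Int.bxor (PySem.Int.bxor p (1 <<< i.toNat)) (r_low <<< (i - 16).toNat)
      else p) p
  PySem.Int.band p 0xFFFF

-- A's outer loop 'for k in (1,2,4,8)' with early return, inner loop = foldl over range k
def aGo (r_low x : Int) : List Nat → Bool
  | [] => true
  | k :: ks =>
      let v := (List.range k).foldl (fun v _ => f16_mul_with_r v v r_low) x
      if v = x then false else aGo r_low x ks

def is_irreducible (r_low : Int) : Bool :=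
  aGo r_low 2 [1, 2, 4, 8]

-- ===== PORT B =====
-- B's single loop 'for step in range(1, 9)' carrying the running value v
def altGo (r_low : Int) : Int → List Nat → Bool
  | _, [] => true
  | v, s :: rest =>
      let v' := f16_mul_with_r v v r_low
      if (s = 1 ∨ s = 2 ∨ s = 4 ∨ s = 8) ∧ v' = 2 then false else altGo r_low v' rest

def is_irreducible_alt (r_low : Int) : Bool :=
  altGo r_low 2 [1, 2, 3, 4, 5, 6, 7, 8]

-- ===== PRECONDITION & SPEC =====
def Spec_is_irreducible (r_low : Int) (out : Bool) : Prop := out = is_irreducible_alt r_low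
instance (r_low : Int) (out : Bool) : Decidable (Spec_is_irreducible r_low out) := by unfold Spec_is_irreducible; infer_instance

-- ===== CLAIM (what is proved, stated in full; the proofs are below) =====
def Claim_equal_is_irreducible : Prop := ∀ (r_low : Int), Dom_is_irreducible r_low → Spec_is_irreducible r_low (is_irreducible r_low)

-- ===== LEMMAS AND PROOFS =====

-- ===== VERDICT (by name: the statement is the Claim_ definition above) =====
theorem is_irreducible_spec : Claim_equal_is_irreducible := by
  intro r _
  unfold Spec_is_irreducible is_irreducible is_irreducible_alt
  simp [aGo, altGo, List.range_succ]
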